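-- pv_equiv track=rewrite | github.com/lefarov/cp_playground | practice/trie/no_prefix_set.py | isGoodSet
-- ===== SOURCE A (Python) =====
-- class Node:
--
--     def __init__(self, childrens, is_word):
--         self.childrens = childrens
--         self.is_word = is_word
--
-- def isGoodSet(set_of_strings):
--     trie = Node({}, False)
--     for string in set_of_strings:
--         current = trie
--         for char in string:
--             # current node is word
--             if current.is_word:
--                 return f"BAD SET\n{string}"
--
--             if char not in current.childrens:
--                 current.childrens[char] = Node({}, False)
--
--             current = current.childrens[char]
--
--         # traversed the entire stirng but there're still some childrens
--         if current.childrens or current.is_word: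
--             return f"BAD SET\n{string}"
--
--         current.is_word = True
--
--     return "GOOD SET"
-- ===== SOURCE B (Python) =====
-- def isGoodSet(set_of_strings):
--     accepted = []
--     for string in set_of_strings:
--         for p in accepted:
--             if string.startswith(p) or p.startswith(string):
--                 return f"BAD SET\n{string}"
--         accepted.append(string)
--     return "GOOD SET"
-- ===== Notes on version B (the rewrite author's own statement) =====
-- stated objective: simpler
-- what changed: Replaced the mutable character trie with a flat list of accepted strings and direct pairwise startswith checks in both directions, returning BAD at the first conflicting string.
import Mathlib
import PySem

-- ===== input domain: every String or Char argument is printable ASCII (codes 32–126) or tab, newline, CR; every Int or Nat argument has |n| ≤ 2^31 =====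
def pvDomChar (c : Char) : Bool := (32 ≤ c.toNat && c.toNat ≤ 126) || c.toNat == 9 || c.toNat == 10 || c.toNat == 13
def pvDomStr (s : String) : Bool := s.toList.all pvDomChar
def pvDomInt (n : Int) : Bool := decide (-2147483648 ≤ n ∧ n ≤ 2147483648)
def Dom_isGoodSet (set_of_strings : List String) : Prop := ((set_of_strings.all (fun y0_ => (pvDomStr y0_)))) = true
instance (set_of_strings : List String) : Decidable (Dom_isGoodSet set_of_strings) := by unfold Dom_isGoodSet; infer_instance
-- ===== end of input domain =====

-- B replaces A's mutable character trie by a flat list of accepted strings with pairwise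
-- startswith checks (simpler); return values proved equal on all inputs.

-- ===== PORT A =====
-- A's trie of Node objects is a NESTED data structure the kernel refuses; it is encoded
-- exactly by the set of node PATHS from the root (a node exists ↔ its path is in `nodes`)
-- together with the set of paths whose node has is_word = True (`words`).  Under this
-- encoding `char in current.childrens` is membership of `cur ++ [c]` in `nodes`,
-- creating the child is adding that path, and `current.childrens` is truthy iff some
-- path of length `cur.length + 1` extending `cur` is in `nodes`.  Step for step exact.
def pvAGo (nodes words : PySem.Set (List Char)) (cur : List Char) :
    List Char → Option (PySem.Set (List Char) × PySem.Set (List Char))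
  | [] =>
      -- if current.childrens or current.is_word: return BAD
      if nodes.any (fun p => cur.isPrefixOf p && p.length == cur.length + 1) || words.contains cur
      then none
      else some (nodes, words.add cur)   -- current.is_word = True
  | c :: rest =>
      -- if current.is_word: return BAD
      if words.contains cur then none
      else
        -- if char not in current.childrens: create it; then current = current.childrens[char]
        pvAGo (if nodes.contains (cur ++ [c]) then nodes else nodes.add (cur ++ [c]))
          words (cur ++ [c]) rest

def pvALoop (nodes words : PySem.Set (List Char)) : List String → String
  | [] => "GOOD SET"
  | s :: rest =>
      match pvAGo nodes words [] s.toList with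
      | none => "BAD SET\n" ++ s
      | some (n, w) => pvALoop n w rest

def isGoodSet (set_of_strings : List String) : String :=
  pvALoop (PySem.Set.ofList [([] : List Char)]) PySem.Set.empty set_of_strings

-- ===== PORT B =====
def pvBLoop (accepted : List String) : List String → String
  | [] => "GOOD SET"
  | s :: rest =>
      -- for p in accepted: if string.startswith(p) or p.startswith(string): return BAD
      if accepted.any (fun p => PySem.Str.startswith s p || PySem.Str.startswith p s)
      then "BAD SET\n" ++ s
      else pvBLoop (accepted ++ [s]) rest   -- accepted.append(string)

def isGoodSet_alt (set_of_strings : List String) : String :=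
  pvBLoop [] set_of_strings

-- ===== PRECONDITION & SPEC =====
def Spec_isGoodSet (set_of_strings : List String) (out : String) : Prop := out = isGoodSet_alt set_of_strings
instance (set_of_strings : List String) (out : String) : Decidable (Spec_isGoodSet set_of_strings out) := by unfold Spec_isGoodSet; infer_instance

-- ===== CLAIM (what is proved, stated in full; the proofs are below) =====
def Claim_equal_isGoodSet : Prop := ∀ (set_of_strings : List String), Dom_isGoodSet set_of_strings → Spec_isGoodSet set_of_strings (isGoodSet set_of_strings)

-- ===== LEMMAS AND PROOFS =====

-- invariants relating A's encoded trie state to B's accepted list: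
-- nodes = root plus all nonempty prefixes of accepted words (and of the partially
-- inserted current string `cur`); words = the accepted strings themselves
def pvMidInv (accepted : List String) (cur : List Char) (nodes : PySem.Set (List Char)) : Prop :=
  ∀ p, p ∈ nodes ↔ p = [] ∨ (p ≠ [] ∧ ((∃ a ∈ accepted, p <+: a.toList) ∨ p <+: cur))

def pvWInv (accepted : List String) (words : PySem.Set (List Char)) : Prop :=
  ∀ p, p ∈ words ↔ ∃ a ∈ accepted, p = a.toList

lemma pv_prefix_concat_char {p cur : List Char} {c : Char} :
    p <+: cur ++ [c] ↔ p <+: cur ∨ p = cur ++ [c] := by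
  constructor
  · intro h
    rcases List.prefix_concat_iff.mp h with h | h
    · exact Or.inr h
    · exact Or.inl h
  · rintro (h | rfl)
    · exact h.trans (List.prefix_append cur [c])
    · exact List.prefix_refl _

lemma pv_exists_child_iff {cur a : List Char} :
    (∃ c, cur ++ [c] <+: a) ↔ cur <+: a ∧ cur.length < a.length := by
  constructor
  · rintro ⟨c, hc⟩
    refine ⟨(List.prefix_append cur [c]).trans hc, ?_⟩
    have := hc.length_le
    simp at this; omega
  · rintro ⟨hpre, hlt⟩
    obtain ⟨t, rfl⟩ := hpre
    rcases t with _ | ⟨c, t⟩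
    · simp at hlt
    · exact ⟨c, by simp⟩

lemma pv_eq_of_prefix_prefix_length {a cur s : List Char}
    (ha : a <+: s) (hc : cur <+: s) (hlen : a.length = cur.length) : a = cur := by
  rcases List.prefix_or_prefix_of_prefix ha hc with h | h
  · exact h.eq_of_length hlen
  · exact (h.eq_of_length hlen.symm).symm

-- the node-set invariant is preserved by A's child-creation step
lemma pvMidInv_step {accepted : List String} {cur : List Char} {c : Char}
    {nodes : PySem.Set (List Char)} (hN : pvMidInv accepted cur nodes) :
    pvMidInv accepted (cur ++ [c])
      (if nodes.contains (cur ++ [c]) then nodes else nodes.add (cur ++ [c])) := by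
  intro p
  by_cases hmem : nodes.contains (cur ++ [c]) = true
  · rw [if_pos hmem, hN p]
    constructor
    · rintro (rfl | ⟨hne, hc2⟩)
      · exact Or.inl rfl
      · refine Or.inr ⟨hne, ?_⟩
        rcases hc2 with h | h
        · exact Or.inl h
        · exact Or.inr (h.trans (List.prefix_append cur [c]))
    · rintro (rfl | ⟨hne, hc2⟩)
      · exact Or.inl rfl
      · refine Or.inr ⟨hne, ?_⟩
        rcases hc2 with h | h
        · exact Or.inl h
        · rcases pv_prefix_concat_char.mp h with h | rfl
          · exact Or.inr h
          · -- p = cur ++ [c] is already a node, so it comes from an accepted word or cur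
            rcases (hN (cur ++ [c])).mp ((PySem.Set.contains_iff _ _).mp hmem) with
              h0 | ⟨_, h3 | h3⟩
            · simp at h0
            · exact Or.inl h3
            · exfalso; have := h3.length_le; simp at this
  · rw [if_neg hmem, PySem.Set.mem_add, hN p]
    constructor
    · rintro ((rfl | ⟨hne, hc2⟩) | rfl)
      · exact Or.inl rfl
      · refine Or.inr ⟨hne, ?_⟩
        rcases hc2 with h | h
        · exact Or.inl h
        · exact Or.inr (h.trans (List.prefix_append cur [c]))
      · exact Or.inr ⟨by simp, Or.inr (List.prefix_refl _)⟩
    · rintro (rfl | ⟨hne, hc2⟩)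
      · exact Or.inl (Or.inl rfl)
      · rcases hc2 with h | h
        · exact Or.inl (Or.inr ⟨hne, Or.inl h⟩)
        · rcases pv_prefix_concat_char.mp h with h | rfl
          · exact Or.inl (Or.inr ⟨hne, Or.inr h⟩)
          · exact Or.inr rfl

-- the inner for-char loop of A, characterised against B's accepted list:
-- it returns BAD exactly when some accepted word and the scanned string are
-- prefix-related, and on success the state invariants extend to the new word
lemma pvAGo_spec (accepted : List String) :
    ∀ (rest cur : List Char) (nodes words : PySem.Set (List Char)),
      pvMidInv accepted cur nodes → pvWInv accepted words →
      (pvAGo nodes words cur rest = none ↔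
        ∃ a ∈ accepted, (a.toList <+: cur ++ rest ∧ cur.length ≤ a.toList.length) ∨ cur ++ rest <+: a.toList)
      ∧ (∀ n' w', pvAGo nodes words cur rest = some (n', w') →
          pvMidInv accepted (cur ++ rest) n' ∧
          ∀ p, p ∈ w' ↔ (∃ a ∈ accepted, p = a.toList) ∨ p = cur ++ rest) := by
  intro rest
  induction rest with
  | nil =>
    intro cur nodes words hN hW
    by_cases hcond : (nodes.any (fun p => cur.isPrefixOf p && p.length == cur.length + 1)
        || words.contains cur) = true
    · constructor
      · simp only [pvAGo, List.append_nil]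
        rw [if_pos hcond]
        refine ⟨fun _ => ?_, fun _ => rfl⟩
        rw [Bool.or_eq_true] at hcond
        rcases hcond with hch | hw
        · rcases List.any_eq_true.mp hch with ⟨p, hp, hpc⟩
          rw [Bool.and_eq_true] at hpc
          obtain ⟨hpre, hlen⟩ := hpc
          have hpre' : cur <+: p := List.isPrefixOf_iff_prefix.mp hpre
          have hlen' : p.length = cur.length + 1 := by simpa using hlen
          rcases (hN p).mp hp with h0 | ⟨hne, ⟨a, ha, hpa⟩ | hpc2⟩
          · subst h0; simp at hlen'
          · exact ⟨a, ha, Or.inr (hpre'.trans hpa)⟩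
          · exfalso; have := hpc2.length_le; omega
        · rcases (hW cur).mp ((PySem.Set.contains_iff _ _).mp hw) with ⟨a, ha, hac⟩
          exact ⟨a, ha, Or.inl ⟨hac ▸ List.prefix_refl _, by simp [← hac]⟩⟩
      · intro n' w' h
        simp only [pvAGo] at h
        rw [if_pos hcond] at h
        exact absurd h (by simp)
    · constructor
      · simp only [pvAGo, List.append_nil]
        rw [if_neg hcond]
        constructor
        · intro h; exact absurd h (by simp)
        · rintro ⟨a, ha, hcase⟩
          exfalso; apply hcond
          rcases hcase with ⟨hpre, hlen⟩ | hpre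
          · -- a.toList = cur : the is_word check fires
            have : a.toList = cur := hpre.eq_of_length (Nat.le_antisymm hpre.length_le hlen)
            rw [Bool.or_eq_true]
            exact Or.inr ((PySem.Set.contains_iff _ _).mpr ((hW cur).mpr ⟨a, ha, this.symm⟩))
          · by_cases hlt : cur.length < a.toList.length
            · -- a strictly extends cur : the childrens check fires
              rcases pv_exists_child_iff.mpr ⟨hpre, hlt⟩ with ⟨c, hc⟩
              rw [Bool.or_eq_true]
              refine Or.inl (List.any_eq_true.mpr ⟨cur ++ [c], ?_, ?_⟩)
              · exact (hN _).mpr (Or.inr ⟨by simp, Or.inl ⟨a, ha, hc⟩⟩)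
              · simp [List.isPrefixOf_iff_prefix]
            · have : a.toList = cur :=
                (hpre.eq_of_length (Nat.le_antisymm hpre.length_le (by omega))).symm
              rw [Bool.or_eq_true]
              exact Or.inr ((PySem.Set.contains_iff _ _).mpr ((hW cur).mpr ⟨a, ha, this.symm⟩))
      · intro n' w' h
        simp only [pvAGo] at h
        rw [if_neg hcond] at h
        injection h with h
        injection h with h1 h2
        subst h1; subst h2
        refine ⟨by rw [List.append_nil]; exact hN, ?_⟩
        intro p
        rw [PySem.Set.mem_add, hW p, List.append_nil]
  | cons c rest ih =>
    intro cur nodes words hN hW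
    have hrec := ih (cur ++ [c])
      (if nodes.contains (cur ++ [c]) then nodes else nodes.add (cur ++ [c])) words
      (pvMidInv_step hN) hW
    by_cases hw : words.contains cur = true
    · constructor
      · simp only [pvAGo]
        rw [if_pos hw]
        refine ⟨fun _ => ?_, fun _ => rfl⟩
        rcases (hW cur).mp ((PySem.Set.contains_iff _ _).mp hw) with ⟨a, ha, hac⟩
        exact ⟨a, ha, Or.inl ⟨hac ▸ List.prefix_append cur (c :: rest), by simp [← hac]⟩⟩
      · intro n' w' h
        simp only [pvAGo] at h
        rw [if_pos hw] at h
        exact absurd h (by simp)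
    · constructor
      · simp only [pvAGo]
        rw [if_neg hw, hrec.1]
        constructor
        · rintro ⟨a, ha, hcase⟩
          refine ⟨a, ha, ?_⟩
          rcases hcase with ⟨hpre, hlen⟩ | hpre
          · simp only [List.length_append, List.length_cons, List.length_nil] at hlen
            exact Or.inl ⟨by simpa using hpre, by omega⟩
          · exact Or.inr (by simpa using hpre)
        · rintro ⟨a, ha, hcase⟩
          refine ⟨a, ha, ?_⟩
          rcases hcase with ⟨hpre, hlen⟩ | hpre
          · by_cases hlt : cur.length < a.toList.length
            · exact Or.inl ⟨by simpa using hpre, by simpa using hlt⟩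
            · -- a.toList = cur would mean the is_word check fired; contradiction with hw
              exfalso
              have hcs : cur <+: cur ++ c :: rest := List.prefix_append _ _
              have : a.toList = cur :=
                pv_eq_of_prefix_prefix_length (by simpa using hpre) hcs (by omega)
              exact hw ((PySem.Set.contains_iff _ _).mpr ((hW cur).mpr ⟨a, ha, this.symm⟩))
          · exact Or.inr (by simpa using hpre)
      · intro n' w' h
        simp only [pvAGo] at h
        rw [if_neg hw] at h
        have := hrec.2 n' w' h
        rw [show cur ++ c :: rest = (cur ++ [c]) ++ rest by simp]
        exact this

lemma pvStartswith_iff (s p : String) :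
    (PySem.Str.startswith s p || PySem.Str.startswith p s) = true ↔
      p.toList <+: s.toList ∨ s.toList <+: p.toList := by
  rw [Bool.or_eq_true, PySem.Str.startswith_eq, PySem.Str.startswith_eq,
    PySem.Chars.startswith_iff, PySem.Chars.startswith_iff]

lemma pvLoop_eq (l : List String) :
    ∀ (accepted : List String) (nodes words : PySem.Set (List Char)),
      pvMidInv accepted [] nodes → pvWInv accepted words →
      pvALoop nodes words l = pvBLoop accepted l := by
  induction l with
  | nil => intro _ _ _ _ _; rfl
  | cons s rest ih =>
    intro accepted nodes words hN hW
    have hspec := pvAGo_spec accepted s.toList [] nodes words hN hW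
    have hcond : (pvAGo nodes words [] s.toList = none) ↔
        (accepted.any (fun p => PySem.Str.startswith s p || PySem.Str.startswith p s)) = true := by
      rw [hspec.1, List.any_eq_true]
      constructor
      · rintro ⟨a, ha, hcase⟩
        refine ⟨a, ha, (pvStartswith_iff s a).mpr ?_⟩
        rcases hcase with ⟨h, _⟩ | h
        · exact Or.inl (by simpa using h)
        · exact Or.inr (by simpa using h)
      · rintro ⟨a, ha, hc⟩
        refine ⟨a, ha, ?_⟩
        rcases (pvStartswith_iff s a).mp hc with h | h
        · exact Or.inl ⟨by simpa using h, by simp⟩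
        · exact Or.inr (by simpa using h)
    simp only [pvALoop, pvBLoop]
    cases hgo : pvAGo nodes words [] s.toList with
    | none =>
      rw [if_pos (hcond.mp hgo)]
    | some nw =>
      have hfalse : (accepted.any (fun p => PySem.Str.startswith s p || PySem.Str.startswith p s)) ≠ true := by
        intro h
        rw [← hcond, hgo] at h
        exact absurd h (by simp)
      rw [if_neg hfalse]
      obtain ⟨n', w'⟩ := nw
      have hinv := hspec.2 n' w' hgo
      apply ih (accepted ++ [s]) n' w'
      · intro p
        rw [hinv.1 p]
        constructor
        · rintro (rfl | ⟨hne, hc⟩)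
          · exact Or.inl rfl
          · refine Or.inr ⟨hne, Or.inl ?_⟩
            rcases hc with ⟨a, ha, hpa⟩ | hps
            · exact ⟨a, by simp [ha], hpa⟩
            · exact ⟨s, by simp, by simpa using hps⟩
        · rintro (rfl | ⟨hne, ⟨a, ha, hpa⟩ | hnil⟩)
          · exact Or.inl rfl
          · rcases List.mem_append.mp ha with ha | ha
            · exact Or.inr ⟨hne, Or.inl ⟨a, ha, hpa⟩⟩
            · have : a = s := by simpa using ha
              subst this
              exact Or.inr ⟨hne, Or.inr (by simpa using hpa)⟩
          · exact absurd (List.prefix_nil.mp hnil) hne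
      · intro p
        rw [hinv.2 p]
        constructor
        · rintro (⟨a, ha, hpa⟩ | rfl)
          · exact ⟨a, by simp [ha], hpa⟩
          · exact ⟨s, by simp, by simp⟩
        · rintro ⟨a, ha, hpa⟩
          rcases List.mem_append.mp ha with ha | ha
          · exact Or.inl ⟨a, ha, hpa⟩
          · have : a = s := by simpa using ha
            subst this
            exact Or.inr (by simpa using hpa)

-- ===== VERDICT (by name: the statement is the Claim_ definition above) =====
theorem isGoodSet_spec : Claim_equal_isGoodSet := by
  intro l _
  show isGoodSet l = isGoodSet_alt l
  unfold isGoodSet isGoodSet_alt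
  apply pvLoop_eq
  · intro p
    constructor
    · intro hp
      have : p = [] := by simpa [PySem.Set.ofList] using hp
      exact Or.inl this
    · rintro (rfl | ⟨hne, hc⟩)
      · simp [PySem.Set.ofList]
      · rcases hc with ⟨a, ha, _⟩ | hp
        · simp at ha
        · exact absurd (List.prefix_nil.mp hp) hne
  · intro p
    simp [PySem.Set.empty]
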